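-- pv_equiv track=rewrite | github.com/nyancol/the-potato-hamlet | potato_pyserver/routers/world_items.py | create_new_house_location
-- ===== SOURCE A (Python) =====
-- def create_new_house_location(current_locations):
--     map_size = 1000
--     max_locations_row = 5
--     for x in range(0, map_size, int(map_size / max_locations_row)):
--         for z in range(0, map_size, int(map_size / max_locations_row)):
--             if (x , z) not in current_locations:
--                 return (x, z)
--     raise Exception("No locations available for new houses")
-- ===== SOURCE B (Python) =====
-- def create_new_house_location(current_locations):
--     map_size = 1000
--     max_locations_row = 5
--     step = map_size // max_locations_row
--     steps = range(0, map_size, step)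
--     free = {(x, z) for x in steps for z in steps} - set(current_locations)
--     if not free:
--         raise Exception("No locations available for new houses")
--     return min(free)
-- ===== Notes on version B (the rewrite author's own statement) =====
-- stated objective: alternative
-- what changed: Replaces the ordered nested short-circuit scan by building the whole set of grid cells, subtracting the occupied set, and returning the lexicographic minimum of the free cells (equal to the first cell the x-outer/z-inner scan finds).
import Mathlib
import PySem

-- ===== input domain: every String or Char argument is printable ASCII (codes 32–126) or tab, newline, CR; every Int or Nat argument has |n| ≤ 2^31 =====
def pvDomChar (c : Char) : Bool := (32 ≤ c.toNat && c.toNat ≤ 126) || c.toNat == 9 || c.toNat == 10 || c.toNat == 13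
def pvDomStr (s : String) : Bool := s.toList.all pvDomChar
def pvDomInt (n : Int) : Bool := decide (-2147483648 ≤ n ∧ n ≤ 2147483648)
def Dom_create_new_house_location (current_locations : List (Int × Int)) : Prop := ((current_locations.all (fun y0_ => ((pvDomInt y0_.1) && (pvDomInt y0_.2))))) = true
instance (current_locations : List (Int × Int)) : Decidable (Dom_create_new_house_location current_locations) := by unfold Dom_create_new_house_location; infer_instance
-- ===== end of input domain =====

-- B changes the algorithm: set difference of the full grid + lexicographic min, instead of
-- A's ordered nested short-circuit scan; equal return value wherever A returns (Pre_).

-- the grid coordinates range(0, 1000, 1000//5)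
def houseSteps : List Int := [0, 200, 400, 600, 800]

-- ===== PORT A =====
-- A: for x in steps: for z in steps: if (x,z) not in current: return (x,z); nested early return
-- is the first `some` of the nested scan. A raises when none is free (outside Pre_); .getD (0,0)
-- there is arbitrary.
def create_new_house_location (current_locations : List (Int × Int)) : Int × Int :=
  (houseSteps.findSome? (fun x =>
    houseSteps.findSome? (fun z =>
      if (x, z) ∈ current_locations then none else some (x, z)))).getD (0, 0)

-- ===== PORT B =====
-- Python tuple comparison: strict lexicographic order on pairs
def lexLt (a b : Int × Int) : Bool :=
  decide (a.1 < b.1 ∨ (a.1 = b.1 ∧ a.2 < b.2))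

-- B: free = all grid cells minus occupied; min(free) is a fold keeping the lex-smaller element.
-- B raises when free is empty (outside Pre_); (0,0) there is arbitrary.
def create_new_house_location_alt (current_locations : List (Int × Int)) : Int × Int :=
  let cells := houseSteps.flatMap (fun x => houseSteps.map (fun z => (x, z)))
  let free := cells.filter (fun c => c ∉ current_locations)
  match free with
  | [] => (0, 0)
  | h :: t => t.foldl (fun acc c => if lexLt c acc then c else acc) h

-- ===== PRECONDITION & SPEC =====
-- Pre_ excludes exactly the inputs on which A (and B) raise: every one of the 25 grid cells occupied.
def Pre_create_new_house_location (current_locations : List (Int × Int)) : Prop :=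
  ∃ c ∈ houseSteps.flatMap (fun x => houseSteps.map (fun z => (x, z))), c ∉ current_locations
instance (current_locations : List (Int × Int)) : Decidable (Pre_create_new_house_location current_locations) := by unfold Pre_create_new_house_location; infer_instance
def pvWitness_create_new_house_location : (List (Int × Int)) := []

def Spec_create_new_house_location (current_locations : List (Int × Int)) (out : Int × Int) : Prop := out = create_new_house_location_alt current_locations
instance (current_locations : List (Int × Int)) (out : Int × Int) : Decidable (Spec_create_new_house_location current_locations out) := by unfold Spec_create_new_house_location; infer_instance

-- ===== CLAIM (what is proved, stated in full; the proofs are below) =====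
def Claim_equal_create_new_house_location : Prop := ∀ (current_locations : List (Int × Int)), Dom_create_new_house_location current_locations → Pre_create_new_house_location current_locations → Spec_create_new_house_location current_locations (create_new_house_location current_locations)

-- ===== LEMMAS AND PROOFS =====

-- the inner z-loop with early return is find? over the mapped row
theorem findSome?_row (x : Int) (zs : List Int) (cur : List (Int × Int)) :
    zs.findSome? (fun z => if (x, z) ∈ cur then none else some (x, z))
    = (zs.map (fun z => (x, z))).find? (fun c => c ∉ cur) := by
  induction zs with
  | nil => simp
  | cons z t ih =>
    simp only [List.findSome?_cons, List.map_cons, List.find?_cons]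
    by_cases hm : (x, z) ∈ cur
    · simp [-List.find?_map, hm, ih]
    · simp [hm]

-- the nested early-return scan is find? over the flattened cell list
theorem findSome?_nested (xs ys : List Int) (cur : List (Int × Int)) :
    xs.findSome? (fun x => ys.findSome? (fun z =>
      if (x, z) ∈ cur then none else some (x, z)))
    = (xs.flatMap (fun x => ys.map (fun z => (x, z)))).find? (fun c => c ∉ cur) := by
  induction xs with
  | nil => simp
  | cons x xs ih =>
    simp only [List.findSome?_cons, List.flatMap_cons, List.find?_append, ← ih,
      findSome?_row]
    cases (ys.map (fun z => (x, z))).find? (fun c => c ∉ cur) <;> simp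

-- find? on a list equals the head of its filter
theorem find?_eq_head?_filter {α : Type} (p : α → Bool) (xs : List α) :
    xs.find? p = (xs.filter p).head? := by
  induction xs with
  | nil => simp
  | cons a t ih =>
    by_cases h : p a = true
    · rw [List.find?_cons_of_pos h, List.filter_cons_of_pos h, List.head?_cons]
    · rw [List.find?_cons_of_neg h, List.filter_cons_of_neg h, ih]

-- folding lex-min from an element smaller than everything returns that element
theorem foldl_min_of_le (h : Int × Int) (t : List (Int × Int))
    (hle : ∀ b ∈ t, lexLt b h = false) :
    t.foldl (fun acc c => if lexLt c acc then c else acc) h = h := by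
  induction t with
  | nil => rfl
  | cons b t ih =>
    have hb : lexLt b h = false := hle b (by simp)
    simp only [List.foldl_cons, hb, Bool.false_eq_true, if_false]
    exact ih (fun c hc => hle c (List.mem_cons_of_mem _ hc))

-- the concrete cell list is strictly lex-sorted
theorem cells_pairwise :
    (houseSteps.flatMap (fun x => houseSteps.map (fun z => (x, z)))).Pairwise
      (fun a b => lexLt a b = true) := by
  decide

theorem create_new_house_location_spec : Claim_equal_create_new_house_location := by
  intro cur _ hpre
  unfold Spec_create_new_house_location
  simp only [create_new_house_location, create_new_house_location_alt]
  rw [findSome?_nested, find?_eq_head?_filter]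
  set cells := houseSteps.flatMap (fun x => houseSteps.map (fun z => (x, z))) with hcells
  have hpw : (cells.filter (fun c => c ∉ cur)).Pairwise (fun a b => lexLt a b = true) :=
    List.Pairwise.filter _ cells_pairwise
  have hne : cells.filter (fun c => c ∉ cur) ≠ [] := by
    obtain ⟨c, hc, hnc⟩ := hpre
    intro hnil
    have hmem : c ∈ cells.filter (fun c => c ∉ cur) :=
      List.mem_filter.mpr ⟨hc, by simpa using hnc⟩
    rw [hnil] at hmem
    simp at hmem
  cases hf : cells.filter (fun c => c ∉ cur) with
  | nil => exact absurd hf hne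
  | cons h t =>
    rw [hf] at hpw
    have hlts := (List.pairwise_cons.mp hpw).1
    simp only [List.head?_cons, Option.getD_some]
    exact (foldl_min_of_le h t (fun b hb => by
      have hlt := hlts b hb
      unfold lexLt at hlt ⊢
      simp only [decide_eq_true_eq] at hlt
      simp only [decide_eq_false_iff_not]
      omega)).symm
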